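-- pv_equiv track=rewrite | github.com/Artaresto/python_2022_matura | Matura_2022/zad3.py | third_numbers
-- ===== SOURCE A (Python) =====
-- def third_numbers(file):
--     thirds = []
--
--     for number in range(0, len(file)):
--         first_number = file[number]
--         for search in range(0, len(file)):
--             if number == search:
--                 continue
--
--             second_number = file[search]
--             if second_number % first_number == 0:
--                 for second_search in range(0, len(file)):
--                     if number == second_search or search == second_search:
--                         continue
--
--                     third_number = file[second_search]
--                     if third_number % second_number == 0:
--                         thirds.append([first_number, second_number, third_number])
--
--     return thirds
-- ===== SOURCE B (Python) =====
-- def third_numbers(file):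
--     n = len(file)
--     # index lists of "multiples": mult[i] = indices j != i with file[j] % file[i] == 0
--     mult = [[j for j in range(n) if j != i and file[j] % file[i] == 0] for i in range(n)]
--     out = []
--     for i in range(n):
--         for j in mult[i]:
--             for k in mult[j]:
--                 if k != i:
--                     out.append([file[i], file[j], file[k]])
--     return out
-- ===== Notes on version B (the rewrite author's own statement) =====
-- stated objective: alternative
-- what changed: Instead of rescanning the whole list with a modulo test inside the two inner loops, B precomputes per-index 'multiple' index lists (mult[i] = indices j != i with file[j] % file[i] == 0) in one O(n^2) pass and then walks only the matching index pairs; on divisibility-dense inputs the output itself dominates, so the measured cost is the same.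
import Mathlib
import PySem

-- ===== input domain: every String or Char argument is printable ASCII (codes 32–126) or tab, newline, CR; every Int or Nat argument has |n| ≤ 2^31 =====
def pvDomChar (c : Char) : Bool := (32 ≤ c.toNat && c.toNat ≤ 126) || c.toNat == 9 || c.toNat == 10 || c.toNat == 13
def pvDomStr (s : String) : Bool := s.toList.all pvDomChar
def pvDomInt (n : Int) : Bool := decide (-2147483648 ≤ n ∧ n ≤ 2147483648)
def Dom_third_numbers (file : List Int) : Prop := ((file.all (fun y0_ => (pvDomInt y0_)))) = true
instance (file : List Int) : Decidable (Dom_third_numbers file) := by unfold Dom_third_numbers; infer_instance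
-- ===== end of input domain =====

-- B precomputes per-index multiple lists once so the inner loops iterate only over matching indices (alternative structure; same results).

-- ===== PORT A =====
def third_numbers (file : List Int) : List (List Int) :=
  (PySem.List.pyRange 0 (PySem.List.len file) 1).foldl (fun thirds number =>
    let first_number := PySem.List.pyGetD file number 0
    (PySem.List.pyRange 0 (PySem.List.len file) 1).foldl (fun thirds search =>
      if number = search then thirds
      else
        let second_number := PySem.List.pyGetD file search 0
        if PySem.Int.mod second_number first_number = 0 then
          (PySem.List.pyRange 0 (PySem.List.len file) 1).foldl (fun thirds second_search =>
            if number = second_search ∨ search = second_search then thirds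
            else
              let third_number := PySem.List.pyGetD file second_search 0
              if PySem.Int.mod third_number second_number = 0 then
                thirds ++ [[first_number, second_number, third_number]]
              else thirds) thirds
        else thirds) thirds) []

-- ===== PORT B =====
def third_numbers_alt (file : List Int) : List (List Int) :=
  let n := PySem.List.len file
  let mult := (PySem.List.pyRange 0 n 1).map (fun i =>
    (PySem.List.pyRange 0 n 1).filter (fun j =>
      j ≠ i ∧ PySem.Int.mod (PySem.List.pyGetD file j 0) (PySem.List.pyGetD file i 0) = 0))
  (PySem.List.pyRange 0 n 1).foldl (fun out i =>
    (PySem.List.pyGetD mult i []).foldl (fun out j =>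
      (PySem.List.pyGetD mult j []).foldl (fun out k =>
        if k ≠ i then
          out ++ [[PySem.List.pyGetD file i 0, PySem.List.pyGetD file j 0, PySem.List.pyGetD file k 0]]
        else out) out) out) []

-- ===== PRECONDITION & SPEC =====
-- Pre_ excludes exactly the inputs on which Python A raises ZeroDivisionError: a 0 element
-- with at least one other element present makes some '% first/second_number' divide by zero.
def Pre_third_numbers (file : List Int) : Prop := (0 : Int) ∉ file ∨ file.length ≤ 1
instance (file : List Int) : Decidable (Pre_third_numbers file) := by unfold Pre_third_numbers; infer_instance
def pvWitness_third_numbers : List Int := [1, 2, 4]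
def Spec_third_numbers (file : List Int) (out : List (List Int)) : Prop := out = third_numbers_alt file
instance (file : List Int) (out : List (List Int)) : Decidable (Spec_third_numbers file out) := by unfold Spec_third_numbers; infer_instance

-- ===== CLAIM (what is proved, stated in full; the proofs are below) =====
def Claim_equal_third_numbers : Prop := ∀ (file : List Int), Dom_third_numbers file → Pre_third_numbers file → Spec_third_numbers file (third_numbers file)

-- ===== LEMMAS AND PROOFS =====

-- helper abbreviations used only by the proofs
def pvR (file : List Int) : List Int := PySem.List.pyRange 0 (PySem.List.len file) 1
def pvG (file : List Int) (i : Int) : Int := PySem.List.pyGetD file i 0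
def pvMult (file : List Int) (i : Int) : List Int :=
  (pvR file).filter (fun j => decide (j ≠ i ∧ PySem.Int.mod (pvG file j) (pvG file i) = 0))
def pvMultMap (file : List Int) : List (List Int) :=
  (pvR file).map (fun i => pvMult file i)
-- the common normal form of both ports
def pvShape (file : List Int) : List (List Int) :=
  (pvR file).flatMap (fun i =>
    (pvR file).flatMap (fun j =>
      if (¬ i = j ∧ PySem.Int.mod (pvG file j) (pvG file i) = 0) then
        ((pvR file).filter (fun k =>
            decide (¬(i = k ∨ j = k) ∧ PySem.Int.mod (pvG file k) (pvG file j) = 0))).map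
          (fun k => [pvG file i, pvG file j, pvG file k])
      else []))

theorem pv_flatMap_congr {α β : Type} (l : List α) (f g : α → List β)
    (h : ∀ x ∈ l, f x = g x) : l.flatMap f = l.flatMap g := by
  induction l with
  | nil => rfl
  | cons a t ih =>
    simp only [List.flatMap_cons]
    rw [h a (by simp), ih (fun x hx => h x (by simp [hx]))]

theorem pv_filter_flatMap {α β : Type} (l : List α) (p : α → Bool) (G : α → List β) :
    (l.filter p).flatMap G = l.flatMap (fun x => if p x then G x else []) := by
  induction l with
  | nil => rfl
  | cons a t ih =>
    by_cases h : p a <;> simp [h, ih]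

theorem pv_A_inner (file : List Int) (i j : Int) (acc : List (List Int)) :
    (pvR file).foldl (fun thirds ss =>
        if i = ss ∨ j = ss then thirds
        else if PySem.Int.mod (pvG file ss) (pvG file j) = 0 then
          thirds ++ [[pvG file i, pvG file j, pvG file ss]]
        else thirds) acc
      = acc ++ ((pvR file).filter (fun k =>
          decide (¬(i = k ∨ j = k) ∧ PySem.Int.mod (pvG file k) (pvG file j) = 0))).map
          (fun k => [pvG file i, pvG file j, pvG file k]) := by
  refine (PySem.List.foldl_congr_mem _ _
    (fun acc k =>
      if (¬(i = k ∨ j = k) ∧ PySem.Int.mod (pvG file k) (pvG file j) = 0) then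
        acc ++ [[pvG file i, pvG file j, pvG file k]]
      else acc) _ ?_).trans (PySem.List.foldl_append_ite _ _ _ _)
  intro acc k _
  by_cases h1 : i = k ∨ j = k <;>
    by_cases h2 : PySem.Int.mod (pvG file k) (pvG file j) = 0 <;>
    simp [h1, h2]

theorem pv_A_mid (file : List Int) (i : Int) (acc : List (List Int)) :
    (pvR file).foldl (fun thirds j =>
        if i = j then thirds
        else if PySem.Int.mod (pvG file j) (pvG file i) = 0 then
          (pvR file).foldl (fun thirds ss =>
            if i = ss ∨ j = ss then thirds
            else if PySem.Int.mod (pvG file ss) (pvG file j) = 0 then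
              thirds ++ [[pvG file i, pvG file j, pvG file ss]]
            else thirds) thirds
        else thirds) acc
      = acc ++ (pvR file).flatMap (fun j =>
          if (¬ i = j ∧ PySem.Int.mod (pvG file j) (pvG file i) = 0) then
            ((pvR file).filter (fun k =>
                decide (¬(i = k ∨ j = k) ∧ PySem.Int.mod (pvG file k) (pvG file j) = 0))).map
              (fun k => [pvG file i, pvG file j, pvG file k])
          else []) := by
  refine (PySem.List.foldl_congr_mem _ _
    (fun thirds j => thirds ++
      (if (¬ i = j ∧ PySem.Int.mod (pvG file j) (pvG file i) = 0) then
        ((pvR file).filter (fun k =>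
            decide (¬(i = k ∨ j = k) ∧ PySem.Int.mod (pvG file k) (pvG file j) = 0))).map
          (fun k => [pvG file i, pvG file j, pvG file k])
      else [])) _ ?_).trans (PySem.List.foldl_append_eq_flatMap _ _ _)
  intro acc j _
  by_cases h1 : i = j
  · simp [h1]
  · by_cases h2 : PySem.Int.mod (pvG file j) (pvG file i) = 0 <;>
      simp [h1, h2, pv_A_inner file i j acc]

theorem pv_A_shape (file : List Int) : third_numbers file = pvShape file := by
  have e : third_numbers file = (pvR file).foldl (fun thirds i =>
      (pvR file).foldl (fun thirds j =>
        if i = j then thirds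
        else if PySem.Int.mod (pvG file j) (pvG file i) = 0 then
          (pvR file).foldl (fun thirds ss =>
            if i = ss ∨ j = ss then thirds
            else if PySem.Int.mod (pvG file ss) (pvG file j) = 0 then
              thirds ++ [[pvG file i, pvG file j, pvG file ss]]
            else thirds) thirds
        else thirds) thirds) [] := rfl
  rw [e]
  unfold pvShape
  refine ((PySem.List.foldl_congr_mem _ _
    (fun thirds i => thirds ++
      (pvR file).flatMap (fun j =>
        if (¬ i = j ∧ PySem.Int.mod (pvG file j) (pvG file i) = 0) then
          ((pvR file).filter (fun k =>
              decide (¬(i = k ∨ j = k) ∧ PySem.Int.mod (pvG file k) (pvG file j) = 0))).map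
            (fun k => [pvG file i, pvG file j, pvG file k])
        else [])) _
    (fun acc i _ => pv_A_mid file i acc)).trans
    (PySem.List.foldl_append_eq_flatMap _ _ _)).trans (List.nil_append _)

theorem pv_mem_pvR {file : List Int} {i : Int} (h : i ∈ pvR file) :
    0 ≤ i ∧ i < PySem.List.len file := by
  simpa [pvR, PySem.List.mem_pyRange_one] using h

theorem pv_getD_mult (file : List Int) (j : Int) (hj : j ∈ pvR file) :
    PySem.List.pyGetD (pvMultMap file) j [] = pvMult file j := by
  obtain ⟨h0, h1⟩ := pv_mem_pvR hj
  exact PySem.List.pyGetD_map_pyRange_of_nonneg _ _ _ _ h0 h1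

theorem pv_B_mid (file : List Int) (i : Int) (acc : List (List Int)) :
    (pvMult file i).foldl (fun out j =>
        (PySem.List.pyGetD (pvMultMap file) j []).foldl (fun out k =>
          if k ≠ i then
            out ++ [[pvG file i, pvG file j, pvG file k]]
          else out) out) acc
      = acc ++ (pvMult file i).flatMap (fun j =>
          ((pvMult file j).filter (fun k => decide (k ≠ i))).map
            (fun k => [pvG file i, pvG file j, pvG file k])) := by
  refine (PySem.List.foldl_congr_mem _ _
    (fun out j => out ++
      ((pvMult file j).filter (fun k => decide (k ≠ i))).map
        (fun k => [pvG file i, pvG file j, pvG file k])) _ ?_).trans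
    (PySem.List.foldl_append_eq_flatMap _ _ _)
  intro acc j hj
  have hjR : j ∈ pvR file := List.mem_of_mem_filter hj
  rw [pv_getD_mult file j hjR]
  exact PySem.List.foldl_append_ite _ _ _ _

theorem pv_B_shape (file : List Int) : third_numbers_alt file = pvShape file := by
  have e : third_numbers_alt file = (pvR file).foldl (fun out i =>
      (PySem.List.pyGetD (pvMultMap file) i []).foldl (fun out j =>
        (PySem.List.pyGetD (pvMultMap file) j []).foldl (fun out k =>
          if k ≠ i then
            out ++ [[pvG file i, pvG file j, pvG file k]]
          else out) out) out) [] := rfl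
  rw [e]
  unfold pvShape
  refine ((PySem.List.foldl_congr_mem _ _
    (fun out i => out ++
      (pvMult file i).flatMap (fun j =>
        ((pvMult file j).filter (fun k => decide (k ≠ i))).map
          (fun k => [pvG file i, pvG file j, pvG file k]))) _
    (fun acc i hi => by rw [pv_getD_mult file i hi]; exact pv_B_mid file i acc)).trans
    ((PySem.List.foldl_append_eq_flatMap _ _ _).trans (List.nil_append _))).trans ?_
  refine pv_flatMap_congr _ _ _ (fun i _ => ?_)
  rw [show (pvMult file i) =
      (pvR file).filter (fun j => decide (j ≠ i ∧ PySem.Int.mod (pvG file j) (pvG file i) = 0))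
    from rfl]
  rw [pv_filter_flatMap]
  refine pv_flatMap_congr _ _ _ (fun j _ => ?_)
  by_cases hc : j ≠ i ∧ PySem.Int.mod (pvG file j) (pvG file i) = 0
  · have hc' : ¬ i = j ∧ PySem.Int.mod (pvG file j) (pvG file i) = 0 :=
      ⟨fun h => hc.1 h.symm, hc.2⟩
    rw [if_pos (by simpa using hc), if_pos hc']
    congr 1
    rw [show (pvMult file j) =
        (pvR file).filter (fun k => decide (k ≠ j ∧ PySem.Int.mod (pvG file k) (pvG file j) = 0))
      from rfl]
    rw [List.filter_filter]
    refine List.filter_congr (fun k _ => ?_)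
    simp only [← Bool.decide_and]
    exact decide_eq_decide.mpr (by omega)
  · have hc' : ¬ (¬ i = j ∧ PySem.Int.mod (pvG file j) (pvG file i) = 0) := by
      intro h; exact hc ⟨fun e => h.1 e.symm, h.2⟩
    rw [if_neg (by simpa using hc), if_neg hc']

-- ===== VERDICT (by name: the statement is the Claim_ definition above) =====
theorem third_numbers_spec : Claim_equal_third_numbers := by
  intro file _ _
  unfold Spec_third_numbers
  rw [pv_A_shape, pv_B_shape]
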